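-- pv_equiv track=rewrite | github.com/fredlen2/iotsec | scripts/sarlock.py | split_bench
-- ===== SOURCE A (Python) =====
-- def split_bench(lines):
--     header, body = [], []
--     in_body = False
--     for ln in lines:
--         # switch to body when seeing first gate definition
--         if not in_body and '=' in ln and not ln.strip().startswith(('INPUT(', 'OUTPUT(')):
--             in_body = True
--         if in_body:
--             body.append(ln)
--         else:
--             header.append(ln)
--     return header, body
-- ===== SOURCE B (Python) =====
-- def split_bench(lines):
--     lines = list(lines)
--     i = next((k for k, ln in enumerate(lines)
--               if '=' in ln and not ln.strip().startswith(('INPUT(', 'OUTPUT('))),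
--              len(lines))
--     return lines[:i], lines[i:]
-- ===== Notes on version B (the rewrite author's own statement) =====
-- stated objective: simpler
-- what changed: Replaced the stateful append-with-flag loop by finding the first gate-definition line's index and returning the two slices around it.
import Mathlib
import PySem

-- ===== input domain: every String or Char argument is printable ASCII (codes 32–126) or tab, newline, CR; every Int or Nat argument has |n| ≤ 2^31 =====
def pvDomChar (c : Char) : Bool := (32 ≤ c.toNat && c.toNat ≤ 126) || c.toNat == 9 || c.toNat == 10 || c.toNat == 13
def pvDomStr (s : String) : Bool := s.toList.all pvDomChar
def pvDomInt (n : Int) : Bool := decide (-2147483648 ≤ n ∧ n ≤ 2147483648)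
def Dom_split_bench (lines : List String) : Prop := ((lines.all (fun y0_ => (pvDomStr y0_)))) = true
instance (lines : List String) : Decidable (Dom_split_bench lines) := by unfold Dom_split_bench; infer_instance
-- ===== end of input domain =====

-- B replaces A's stateful append-with-flag loop by finding the first gate line's index and slicing; objective: simpler.

-- ===== PORT A =====
-- literal port of A: fold over the lines carrying (header, body, in_body)
def split_bench (lines : List String) : List String × List String :=
  let st := lines.foldl
    (fun (st : List String × List String × Bool) ln =>
      let inb :=
        if !st.2.2 && (PySem.Str.isIn "=" ln
            && !(PySem.Str.startswith (PySem.Str.strip ln) "INPUT("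
                 || PySem.Str.startswith (PySem.Str.strip ln) "OUTPUT("))
        then true else st.2.2
      if inb then (st.1, st.2.1 ++ [ln], inb) else (st.1 ++ [ln], st.2.1, inb))
    ([], [], false)
  (st.1, st.2.1)

-- ===== PORT B =====
-- literal port of B: index of the first gate-definition line, then the two slices
def split_bench_alt (lines : List String) : List String × List String :=
  let i := lines.findIdx
    (fun ln => PySem.Str.isIn "=" ln
      && !(PySem.Str.startswith (PySem.Str.strip ln) "INPUT("
           || PySem.Str.startswith (PySem.Str.strip ln) "OUTPUT("))
  (lines.take i, lines.drop i)

-- ===== PRECONDITION & SPEC =====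
def Spec_split_bench (lines : List String) (out : List String × List String) : Prop := out = split_bench_alt lines
instance (lines : List String) (out : List String × List String) : Decidable (Spec_split_bench lines out) := by unfold Spec_split_bench; infer_instance

-- ===== CLAIM (what is proved, stated in full; the proofs are below) =====
def Claim_equal_split_bench : Prop := ∀ (lines : List String), Dom_split_bench lines → Spec_split_bench lines (split_bench lines)

-- ===== LEMMAS AND PROOFS =====

-- the gate-line condition, abbreviated for the proofs (both ports spell it inline)
def pvGate (ln : String) : Bool :=
  PySem.Str.isIn "=" ln
    && !(PySem.Str.startswith (PySem.Str.strip ln) "INPUT("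
         || PySem.Str.startswith (PySem.Str.strip ln) "OUTPUT(")

-- A's loop body, named for the proofs
def pvStep (st : List String × List String × Bool) (ln : String) : List String × List String × Bool :=
  let inb := if !st.2.2 && pvGate ln then true else st.2.2
  if inb then (st.1, st.2.1 ++ [ln], inb) else (st.1 ++ [ln], st.2.1, inb)

-- once in_body is true, every remaining line goes to body
theorem pvStep_fold_true (ls : List String) : ∀ (h b : List String),
    ls.foldl pvStep (h, b, true) = (h, b ++ ls, true) := by
  induction ls with
  | nil => intro h b; simp
  | cons a tl ih =>
    intro h b
    simp only [List.foldl_cons, pvStep]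
    simp [ih]

-- while in_body is false, the fold realizes take/drop at the first gate line
theorem pvStep_fold_false (ls : List String) : ∀ (h : List String),
    ls.foldl pvStep (h, [], false)
      = (h ++ ls.take (ls.findIdx pvGate), ls.drop (ls.findIdx pvGate),
         ls.any pvGate) := by
  induction ls with
  | nil => intro h; simp
  | cons a tl ih =>
    intro h
    rw [List.foldl_cons]
    by_cases hg : pvGate a = true
    · have hs : pvStep (h, [], false) a = (h, [a], true) := by simp [pvStep, hg]
      rw [hs, pvStep_fold_true]
      simp [List.findIdx_cons, hg]
    · have hg' : pvGate a = false := by simpa using hg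
      have hs : pvStep (h, [], false) a = (h ++ [a], [], false) := by simp [pvStep, hg']
      rw [hs, ih]
      simp [List.findIdx_cons, hg']

theorem split_bench_eq (lines : List String) : split_bench lines = split_bench_alt lines := by
  have hstep : (fun (st : List String × List String × Bool) ln =>
      let inb :=
        if !st.2.2 && (PySem.Str.isIn "=" ln
            && !(PySem.Str.startswith (PySem.Str.strip ln) "INPUT("
                 || PySem.Str.startswith (PySem.Str.strip ln) "OUTPUT("))
        then true else st.2.2
      if inb then (st.1, st.2.1 ++ [ln], inb) else (st.1 ++ [ln], st.2.1, inb)) = pvStep := by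
    funext st ln; simp [pvStep, pvGate]
  unfold split_bench split_bench_alt
  simp only [hstep, pvStep_fold_false lines [], List.nil_append]
  rfl

-- ===== VERDICT (by name: the statement is the Claim_ definition above) =====
theorem split_bench_spec : Claim_equal_split_bench := by
  intro lines _
  unfold Spec_split_bench
  exact split_bench_eq lines
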